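-- pv_equiv track=rewrite | github.com/miliar/Code_Jam_Webscraper | solutions_python/Problem_158/644.py | all_combos
-- ===== SOURCE A (Python) =====
-- def rotate(o):
--     return [(y, -x) for x, y in o]
--
-- def reflect(o):
--     return [(-x,y) for x,y in o]
--
-- def all_combos(o):
--     yield o
--     a = o
--     for i in range(3):
--         a = rotate(a)
--         yield a
--     r = reflect(o)
--     yield r
--     a=r
--     for i in range(3):
--         a=rotate(a)
--         yield a
-- ===== SOURCE B (Python) =====
-- def all_combos(o):
--     # Simpler: yield o, then the seven symmetry images each computed
--     # directly from o in closed form (no chained rotations).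
--     yield o
--     for f in ((lambda x, y: (y, -x)),
--               (lambda x, y: (-x, -y)),
--               (lambda x, y: (-y, x)),
--               (lambda x, y: (-x, y)),
--               (lambda x, y: (y, x)),
--               (lambda x, y: (x, -y)),
--               (lambda x, y: (-y, -x))):
--         yield [f(x, y) for x, y in o]
-- ===== Notes on version B (the rewrite author's own statement) =====
-- stated objective: simpler
-- what changed: Instead of mutating an accumulator through two chained rotate loops plus a reflect, B yields o and then the seven remaining symmetry images, each computed independently from o by a closed-form coordinate transform taken from a fixed list of seven lambdas.
import Mathlib
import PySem

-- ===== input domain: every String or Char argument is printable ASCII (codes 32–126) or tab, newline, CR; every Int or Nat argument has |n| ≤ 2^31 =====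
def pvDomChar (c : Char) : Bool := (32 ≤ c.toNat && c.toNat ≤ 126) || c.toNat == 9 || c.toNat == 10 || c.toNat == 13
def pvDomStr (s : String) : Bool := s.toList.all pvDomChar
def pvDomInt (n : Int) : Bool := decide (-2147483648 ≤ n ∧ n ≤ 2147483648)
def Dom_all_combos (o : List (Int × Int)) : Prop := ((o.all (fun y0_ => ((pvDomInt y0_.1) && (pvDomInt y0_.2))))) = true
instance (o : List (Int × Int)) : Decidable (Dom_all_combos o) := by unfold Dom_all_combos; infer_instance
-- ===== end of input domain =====

-- B yields o then the seven remaining symmetry images in closed form from o (simpler: no chained accumulator).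


-- ===== PORT A =====
def rotate (o : List (Int × Int)) : List (Int × Int) :=
  o.map (fun p => (p.2, -p.1))

def reflect (o : List (Int × Int)) : List (Int × Int) :=
  o.map (fun p => (-p.1, p.2))

-- A: yield o; three chained rotations; reflect; three more chained rotations.
def all_combos (o : List (Int × Int)) : List (List (Int × Int)) :=
  let a1 := rotate o
  let a2 := rotate a1
  let a3 := rotate a2
  let r := reflect o
  let b1 := rotate r
  let b2 := rotate b1
  let b3 := rotate b2
  [o, a1, a2, a3, r, b1, b2, b3]

-- ===== PORT B =====
-- B: o, then seven independent closed-form transforms applied to o.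
def all_combos_alt (o : List (Int × Int)) : List (List (Int × Int)) :=
  o :: ([fun x y => (y, -x), fun x y => (-x, -y), fun x y => (-y, x),
         fun x y => (-x, y), fun x y => (y, x), fun x y => (x, -y),
         fun x y => (-y, -x)] : List (Int → Int → Int × Int)).map
    (fun f => o.map (fun p => f p.1 p.2))

-- ===== PRECONDITION & SPEC =====
def Spec_all_combos (o : List (Int × Int)) (out : List (List (Int × Int))) : Prop := out = all_combos_alt o
instance (o : List (Int × Int)) (out : List (List (Int × Int))) : Decidable (Spec_all_combos o out) := by unfold Spec_all_combos; infer_instance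

-- ===== CLAIM (what is proved, stated in full; the proofs are below) =====
def Claim_equal_all_combos : Prop := ∀ (o : List (Int × Int)), Dom_all_combos o → Spec_all_combos o (all_combos o)

-- ===== LEMMAS AND PROOFS =====

-- ===== VERDICT (by name: the statement is the Claim_ definition above) =====
theorem all_combos_spec : Claim_equal_all_combos := by
  intro o _
  unfold Spec_all_combos all_combos all_combos_alt rotate reflect
  simp [List.map_map, Function.comp, neg_neg]
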